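-- pv_equiv track=rewrite | github.com/james-a-page/Music-Performance-Museformer | train/models/mask_utils.py | get_bar_locations
-- ===== SOURCE A (Python) =====
-- from typing import List, Tuple
--
-- def get_bar_locations(sequence : List[int], summary_idx: List[int]) -> List[Tuple]:
--     bar_pairs = []
--     if not sequence:
--         return bar_pairs
--     bar_start = None
--     for pos, token in enumerate(sequence):
--         if token in summary_idx:
--             if bar_start is not None:
--                 bar_pairs.append((bar_start, pos))
--             bar_start = pos + 1
--
--     return bar_pairs
-- ===== SOURCE B (Python) =====
-- from typing import List, Tuple
--
-- def get_bar_locations(sequence: List[int], summary_idx: List[int]) -> List[Tuple]: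
--     # Phase 1: run-length encode — length of each maximal run of
--     # non-summary tokens preceding a summary token (trailing run dropped).
--     runs = []
--     count = 0
--     for token in sequence:
--         if token in summary_idx:
--             runs.append(count)
--             count = 0
--         else:
--             count += 1
--     # Phase 2: reconstruct positions from the gap lengths.
--     pairs = []
--     prev_end = 0      # index just after the previous summary token
--     first = True
--     for gap in runs:
--         marker = prev_end + gap
--         if not first:
--             pairs.append((prev_end, marker))
--         prev_end = marker + 1
--         first = False
--     return pairs
-- ===== Notes on version B (the rewrite author's own statement) =====
-- stated objective: alternative
-- what changed: B never tracks token positions in its scan: it run-length encodes the gaps of non-summary tokens between summary tokens, then reconstructs the (start, end) index pairs arithmetically from those gap lengths in a second pass.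
import Mathlib
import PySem

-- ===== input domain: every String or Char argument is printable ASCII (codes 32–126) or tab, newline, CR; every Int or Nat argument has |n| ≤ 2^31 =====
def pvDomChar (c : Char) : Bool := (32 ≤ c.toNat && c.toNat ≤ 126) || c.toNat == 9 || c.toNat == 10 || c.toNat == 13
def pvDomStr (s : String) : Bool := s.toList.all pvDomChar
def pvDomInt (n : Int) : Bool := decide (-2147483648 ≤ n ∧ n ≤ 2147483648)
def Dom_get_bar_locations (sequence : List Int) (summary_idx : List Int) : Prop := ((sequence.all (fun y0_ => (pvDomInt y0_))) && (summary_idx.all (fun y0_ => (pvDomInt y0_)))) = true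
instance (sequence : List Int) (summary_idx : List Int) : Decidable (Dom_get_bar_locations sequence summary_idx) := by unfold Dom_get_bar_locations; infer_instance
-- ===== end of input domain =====

-- B run-length encodes the gaps between summary tokens and rebuilds index pairs from the gap lengths; objective: alternative (same cost, different representation).


-- ===== PORT A =====
-- A's for-loop: state = (bar_pairs accumulator, optional bar_start), pos is the enumerate counter
def gblLoop (summary_idx : List Int) : List Int → Int → List (Int × Int) → Option Int → List (Int × Int)
  | [], _, bar_pairs, _ => bar_pairs
  | token :: rest, pos, bar_pairs, bar_start =>
    if token ∈ summary_idx then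
      gblLoop summary_idx rest (pos + 1)
        (bar_pairs ++ (match bar_start with | some s => [(s, pos)] | none => []))
        (some (pos + 1))
    else
      gblLoop summary_idx rest (pos + 1) bar_pairs bar_start

def get_bar_locations (sequence : List Int) (summary_idx : List Int) : List (Int × Int) :=
  if sequence = [] then [] else gblLoop summary_idx sequence 0 [] none

-- ===== PORT B =====
-- phase 1 of B: run-length encode the gaps of non-summary tokens before each summary token
def gblRuns (summary_idx : List Int) : List Int → Int → List Int
  | [], _ => []
  | token :: rest, count =>
    if token ∈ summary_idx then count :: gblRuns summary_idx rest 0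
    else gblRuns summary_idx rest (count + 1)

-- phase 2 of B: rebuild (prev_end, marker) pairs from the gap lengths
def gblPairs : List Int → Int → Bool → List (Int × Int)
  | [], _, _ => []
  | gap :: gs, prev_end, first =>
    (if first then [] else [(prev_end, prev_end + gap)]) ++ gblPairs gs (prev_end + gap + 1) false

def get_bar_locations_alt (sequence : List Int) (summary_idx : List Int) : List (Int × Int) :=
  gblPairs (gblRuns summary_idx sequence 0) 0 true

-- ===== PRECONDITION & SPEC =====
def Spec_get_bar_locations (sequence : List Int) (summary_idx : List Int) (out : List (Int × Int)) : Prop := out = get_bar_locations_alt sequence summary_idx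
instance (sequence : List Int) (summary_idx : List Int) (out : List (Int × Int)) : Decidable (Spec_get_bar_locations sequence summary_idx out) := by unfold Spec_get_bar_locations; infer_instance

-- ===== CLAIM (what is proved, stated in full; the proofs are below) =====
def Claim_equal_get_bar_locations : Prop := ∀ (sequence : List Int) (summary_idx : List Int), Dom_get_bar_locations sequence summary_idx → Spec_get_bar_locations sequence summary_idx (get_bar_locations sequence summary_idx)

-- ===== LEMMAS AND PROOFS =====

-- after a marker: A at position prev_end + count with bar_start = some prev_end
-- equals B's pair reconstruction over the remaining gap lengths starting at count
theorem gblLoop_some (summary_idx : List Int) :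
    ∀ (l : List Int) (c s : Int) (acc : List (Int × Int)),
      gblLoop summary_idx l (s + c) acc (some s)
        = acc ++ gblPairs (gblRuns summary_idx l c) s false := by
  intro l
  induction l with
  | nil => intro c s acc; simp [gblLoop, gblRuns, gblPairs]
  | cons t rest ih =>
    intro c s acc
    by_cases h : t ∈ summary_idx
    · simp only [gblLoop, gblRuns, gblPairs, h, if_pos]
      have H := ih 0 (s + c + 1) (acc ++ [(s, s + c)])
      simp only [add_zero] at H
      rw [H]; simp
    · have h1 : s + c + 1 = s + (c + 1) := by ring
      simp only [gblLoop, gblRuns, h, if_neg, not_false_iff]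
      rw [h1, ih (c + 1) s]

-- before any marker: A at position c with bar_start = none
theorem gblLoop_none (summary_idx : List Int) :
    ∀ (l : List Int) (c : Int) (acc : List (Int × Int)),
      gblLoop summary_idx l c acc none
        = acc ++ gblPairs (gblRuns summary_idx l c) 0 true := by
  intro l
  induction l with
  | nil => intro c acc; simp [gblLoop, gblRuns, gblPairs]
  | cons t rest ih =>
    intro c acc
    by_cases h : t ∈ summary_idx
    · simp only [gblLoop, gblRuns, gblPairs, h, if_pos]
      have H := gblLoop_some summary_idx rest 0 (c + 1) acc
      simp only [add_zero] at H
      simpa [zero_add, add_comm] using H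
    · simp only [gblLoop, gblRuns, h, if_neg, not_false_iff]
      exact ih (c + 1) acc

-- ===== VERDICT (by name: the statement is the Claim_ definition above) =====
theorem get_bar_locations_spec : Claim_equal_get_bar_locations := by
  intro sequence summary_idx _
  unfold Spec_get_bar_locations get_bar_locations get_bar_locations_alt
  by_cases hseq : sequence = []
  · subst hseq; simp [gblRuns, gblPairs]
  · simp only [hseq, if_neg, not_false_iff]
    simpa using gblLoop_none summary_idx sequence 0 []
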